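-- pv_equiv track=rewrite | github.com/simonsandell/advent-of-code-2019 | 17/2.py | best_possible
-- ===== SOURCE A (Python) =====
-- def best_possible(progs, skip_progs):
--     p = progs.copy()
--     while True:
--         b = get_max_value(p)
--         if b in skip_progs:
--             del p[b]
--         else:
--             return b
--
-- def get_max_value(programs):
--     max_val = 0
--     best_prog = None
--     for k in programs:
--         if programs[k] > max_val:
--             max_val = programs[k]
--             best_prog = k
--     return best_prog
-- ===== SOURCE B (Python) =====
-- def best_possible(progs, skip_progs):
--     skip = set(skip_progs)
--     best = None
--     best_val = 0
--     for k, v in progs.items():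
--         if v > best_val and k not in skip:
--             best_val = v
--             best = k
--     return best
-- ===== Notes on version B (the rewrite author's own statement) =====
-- stated objective: simpler
-- what changed: Replaces A's repeated max-scan-and-delete loop over a mutated dict copy by a single pass that skips the skip-set entries during one filtered max scan (skip list turned into a set once).
import Mathlib
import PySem

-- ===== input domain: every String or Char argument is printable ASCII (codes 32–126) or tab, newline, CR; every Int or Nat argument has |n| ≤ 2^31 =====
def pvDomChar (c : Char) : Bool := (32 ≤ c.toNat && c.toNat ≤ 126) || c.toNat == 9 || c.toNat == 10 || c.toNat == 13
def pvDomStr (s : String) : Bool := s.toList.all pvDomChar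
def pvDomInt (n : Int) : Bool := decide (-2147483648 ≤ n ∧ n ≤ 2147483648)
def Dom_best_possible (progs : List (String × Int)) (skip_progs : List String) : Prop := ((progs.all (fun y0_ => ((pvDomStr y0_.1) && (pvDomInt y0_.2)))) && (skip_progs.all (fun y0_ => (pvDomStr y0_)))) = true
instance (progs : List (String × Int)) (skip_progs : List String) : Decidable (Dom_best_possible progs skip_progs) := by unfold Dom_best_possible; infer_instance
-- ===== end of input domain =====

-- B replaces A's repeated max-scan-and-delete loop over a mutated dict copy with a single
-- filtered max pass over the entries (objective: simpler).


-- ===== PORT A =====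
def get_max_value (programs : PySem.Dict String Int) : Option String :=
  (programs.keys.foldl
    (fun (st : Int × Option String) k =>
      if programs.getD k 0 > st.1 then (programs.getD k 0, some k) else st)
    ((0 : Int), (none : Option String))).2

-- termination facts for the while loop (cited by decreasing_by, so they stay above the port)
theorem pv_snd_foldl_mem (programs : PySem.Dict String Int) (l : List String)
    (st : Int × Option String) (b : String)
    (h : (l.foldl
      (fun (st : Int × Option String) k =>
        if programs.getD k 0 > st.1 then (programs.getD k 0, some k) else st) st).2 = some b) :
    b ∈ l ∨ st.2 = some b := by
  induction l generalizing st with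
  | nil => exact Or.inr h
  | cons x xs ih =>
    simp only [List.foldl_cons] at h
    rcases ih _ h with hmem | hst
    · exact Or.inl (List.mem_cons_of_mem _ hmem)
    · by_cases hc : programs.getD x 0 > st.1
      · simp [hc] at hst; simp [hst]
      · simp [hc] at hst; exact Or.inr hst

theorem pv_erase_size_lt (p : PySem.Dict String Int) (b : String)
    (h : get_max_value p = some b) : (p.erase b).size < p.size := by
  have hb : b ∈ p.keys := by
    rcases pv_snd_foldl_mem p p.keys ((0 : Int), none) b h with h' | h'
    · exact h'
    · simp at h'
  rcases List.mem_map.mp hb with ⟨kv, hkv, hfst⟩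
  show ((p.items.filter fun q => !(q.1 == b)).length) < p.items.length
  refine List.length_filter_lt_length_iff_exists.mpr ⟨kv, hkv, ?_⟩
  simp [hfst]

def best_possible_loop (p : PySem.Dict String Int) (skip_progs : List String) : Option String :=
  match h : get_max_value p with
  | none => none  -- b is None; 'None in skip_progs' is False for a list of strings, so A returns None
  | some b =>
    if skip_progs.contains b then best_possible_loop (p.erase b) skip_progs else some b
termination_by p.size
decreasing_by exact pv_erase_size_lt p b h

def best_possible (progs : List (String × Int)) (skip_progs : List String) : Option String :=
  best_possible_loop (PySem.Dict.ofList progs) skip_progs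

-- ===== PORT B =====
def best_possible_alt (progs : List (String × Int)) (skip_progs : List String) : Option String :=
  ((PySem.Dict.ofList progs).items.foldl
    (fun (st : Int × Option String) kv =>
      if kv.2 > st.1 && !((PySem.Set.ofList skip_progs).contains kv.1) then (kv.2, some kv.1) else st)
    ((0 : Int), (none : Option String))).2

-- ===== PRECONDITION & SPEC =====
def Spec_best_possible (progs : List (String × Int)) (skip_progs : List String) (out : Option String) : Prop := out = best_possible_alt progs skip_progs
instance (progs : List (String × Int)) (skip_progs : List String) (out : Option String) : Decidable (Spec_best_possible progs skip_progs out) := by unfold Spec_best_possible; infer_instance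

-- ===== CLAIM (what is proved, stated in full; the proofs are below) =====
def Claim_equal_best_possible : Prop := ∀ (progs : List (String × Int)) (skip_progs : List String), Dom_best_possible progs skip_progs → Spec_best_possible progs skip_progs (best_possible progs skip_progs)

-- ===== LEMMAS AND PROOFS =====

-- the filtered max-scan step, abstracted over the eligibility predicate P
def eStep (P : String → Bool) (st : Int × Option String) (kv : String × Int) :
    Int × Option String :=
  if kv.2 > st.1 && P kv.1 then (kv.2, some kv.1) else st

def gFold (P : String → Bool) (l : List (String × Int)) : Int × Option String :=
  l.foldl (eStep P) ((0 : Int), none)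

-- the result of a filtered max scan: first occurrence of the maximal positive eligible value
def IsRes (P : String → Bool) (l : List (String × Int)) (k : String) (v : Int) : Prop :=
  ∃ l1 l2, l = l1 ++ (k, v) :: l2 ∧ P k = true ∧ 0 < v ∧
    (∀ kv ∈ l1, P kv.1 = true → kv.2 < v) ∧
    (∀ kv ∈ l2, P kv.1 = true → kv.2 ≤ v)

theorem gfold_fst_lt (P : String → Bool) (l : List (String × Int)) (st : Int × Option String)
    (v : Int) (hst : st.1 < v) (hall : ∀ kv ∈ l, P kv.1 = true → kv.2 < v) :
    (l.foldl (eStep P) st).1 < v := by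
  induction l generalizing st with
  | nil => exact hst
  | cons x xs ih =>
    simp only [List.foldl_cons]
    refine ih _ ?_ (fun kv h hp => hall kv (List.mem_cons_of_mem _ h) hp)
    unfold eStep
    split
    · next hcond =>
      exact hall x (List.mem_cons_self) (Bool.and_elim_right hcond)
    · exact hst

theorem gfold_stay (P : String → Bool) (l : List (String × Int)) (st : Int × Option String)
    (hall : ∀ kv ∈ l, P kv.1 = true → kv.2 ≤ st.1) :
    l.foldl (eStep P) st = st := by
  induction l with
  | nil => rfl
  | cons x xs ih =>
    simp only [List.foldl_cons]
    have hx : eStep P st x = st := by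
      unfold eStep
      split
      · next hcond =>
        have h1 := Bool.and_elim_left hcond
        have h2 := Bool.and_elim_right hcond
        have := hall x (List.mem_cons_self) h2
        simp at h1; omega
      · rfl
    rw [hx]
    exact ih (fun kv h hp => hall kv (List.mem_cons_of_mem _ h) hp)

theorem gfold_char (P : String → Bool) (l : List (String × Int)) (k : String) (v : Int)
    (h : IsRes P l k v) : gFold P l = (v, some k) := by
  rcases h with ⟨l1, l2, rfl, hP, hv, h1, h2⟩
  unfold gFold
  rw [List.foldl_append, List.foldl_cons]
  have hfst : (l1.foldl (eStep P) ((0 : Int), none)).1 < v := gfold_fst_lt P l1 _ v hv h1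
  have hstep : ∀ st : Int × Option String, st.1 < v → eStep P st (k, v) = (v, some k) := by
    intro st hlt
    unfold eStep
    split
    · rfl
    · next hcond =>
      exfalso
      simp [hP] at hcond
      omega
  rw [hstep _ hfst]
  exact gfold_stay P l2 (v, some k) h2

theorem gfold_dichot (P : String → Bool) (l : List (String × Int)) :
    (∀ kv ∈ l, P kv.1 = true → kv.2 ≤ 0) ∨ ∃ k v, IsRes P l k v := by
  induction l using List.reverseRecOn with
  | nil => exact Or.inl (by simp)
  | append_singleton xs x ih =>
    by_cases hx : 0 < x.2 ∧ P x.1 = true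
    · right
      rcases ih with hall | ⟨k, v, l1, l2, rfl, hP, hv, h1, h2⟩
      · exact ⟨x.1, x.2, xs, [], by simp, hx.2, hx.1, fun kv h hp => lt_of_le_of_lt (hall kv h hp) hx.1, by simp⟩
      · by_cases hgt : v < x.2
        · refine ⟨x.1, x.2, l1 ++ (k, v) :: l2, [], by simp, hx.2, hx.1, ?_, by simp⟩
          intro kv h hp
          rcases List.mem_append.mp h with h | h
          · exact lt_trans (h1 kv h hp) hgt
          · rcases List.mem_cons.mp h with rfl | h
            · exact hgt
            · exact lt_of_le_of_lt (h2 kv h hp) hgt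
        · refine ⟨k, v, l1, l2 ++ [x], by simp, hP, hv, h1, ?_⟩
          intro kv h hp
          rcases List.mem_append.mp h with h | h
          · exact h2 kv h hp
          · rcases List.mem_singleton.mp h with rfl
            omega
    · rcases ih with hall | ⟨k, v, l1, l2, rfl, hP, hv, h1, h2⟩
      · left
        intro kv h hp
        rcases List.mem_append.mp h with h | h
        · exact hall kv h hp
        · rcases List.mem_singleton.mp h with rfl
          by_contra hc
          exact hx ⟨by omega, hp⟩
      · right
        refine ⟨k, v, l1, l2 ++ [x], by simp, hP, hv, h1, ?_⟩
        intro kv h hp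
        rcases List.mem_append.mp h with h | h
        · exact h2 kv h hp
        · rcases List.mem_singleton.mp h with rfl
          by_cases h0 : 0 < kv.2
          · exact absurd ⟨h0, hp⟩ hx
          · omega

-- A's key scan over a nodup-keyed dict is the unfiltered max scan over its items
theorem gmv_bridge (d : PySem.Dict String Int) (hnd : d.keys.Nodup) :
    get_max_value d = (gFold (fun _ => true) d.items).2 := by
  unfold get_max_value gFold
  congr 1
  show (d.items.map (·.1)).foldl _ _ = _
  rw [List.foldl_map]
  refine PySem.List.foldl_congr_mem _ _ _ _ ?_
  intro acc kv hkv
  have hget : d.getD kv.1 0 = kv.2 :=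
    PySem.Dict.getD_of_mem_items d (by simpa using hkv) hnd 0
  simp [eStep, hget]

theorem alt_bridge (progs : List (String × Int)) (skip_progs : List String) :
    best_possible_alt progs skip_progs =
      (gFold (fun k => !(skip_progs.contains k)) (PySem.Dict.ofList progs).items).2 := by
  unfold best_possible_alt gFold
  congr 1
  refine PySem.List.foldl_congr_mem _ _ _ _ ?_
  intro acc kv _
  simp [eStep]

-- removing the entries of a skip key does not change the filtered scan
theorem gfold_filter_skip (skip_progs : List String) (b : String)
    (hb : skip_progs.contains b = true) (l : List (String × Int)) :
    gFold (fun k => !(skip_progs.contains k)) (l.filter fun q => !(q.1 == b)) =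
      gFold (fun k => !(skip_progs.contains k)) l := by
  unfold gFold
  rw [List.foldl_filter]
  refine PySem.List.foldl_congr_mem _ _ _ _ ?_
  intro acc kv _
  by_cases hkb : kv.1 = b
  · subst hkb
    have hmem : kv.1 ∈ skip_progs := by simpa using hb
    simp [eStep, hmem]
  · simp [hkb]

theorem loop_eq (skip_progs : List String) :
    ∀ n (d : PySem.Dict String Int), d.size ≤ n → d.keys.Nodup →
      best_possible_loop d skip_progs =
        (gFold (fun k => !(skip_progs.contains k)) d.items).2 := by
  intro n
  induction n with
  | zero =>
    intro d hsz hnd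
    have hnil : d.items = [] := List.length_eq_zero_iff.mp (Nat.le_zero.mp hsz)
    rw [best_possible_loop]
    split
    · show (none : Option String) = (gFold _ d.items).2
      rw [hnil]
      rfl
    · next b heq =>
      exfalso
      have hgm : get_max_value d = none := by
        unfold get_max_value
        simp [PySem.Dict.keys, hnil]
      rw [hgm] at heq
      cases heq
  | succ n ih =>
    intro d hsz hnd
    rcases gfold_dichot (fun _ => true) d.items with hall | ⟨k, v, hres⟩
    · have hA : get_max_value d = none := by
        rw [gmv_bridge d hnd]
        unfold gFold
        rw [gfold_stay (fun _ => true) d.items ((0 : Int), none) (by simpa using hall)]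
      have hB : gFold (fun k => !(skip_progs.contains k)) d.items = ((0 : Int), none) := by
        unfold gFold
        exact gfold_stay _ d.items _ (fun kv h _ => hall kv h rfl)
      rw [best_possible_loop]
      split
      · rw [hB]
      · next b heq =>
        rw [hA] at heq
        cases heq
    · have hA : get_max_value d = some k := by
        rw [gmv_bridge d hnd, gfold_char (fun _ => true) d.items k v hres]
      rw [best_possible_loop]
      split
      · next heq =>
        rw [hA] at heq
        cases heq
      · next b heq =>
        rw [hA] at heq
        injection heq with heq
        subst heq
        by_cases hc : skip_progs.contains k = true
        · rw [if_pos hc]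
          have hnd' : (d.erase k).keys.Nodup := by
            have hsub : (List.filter (fun q => !(q.1 == k)) d.items).Sublist d.items :=
              List.filter_sublist
            have hsub2 : ((List.filter (fun q => !(q.1 == k)) d.items).map
                (fun q : String × Int => q.1)).Sublist (d.items.map (fun q : String × Int => q.1)) :=
              hsub.map _
            exact hnd.sublist hsub2
          have hsz' : (d.erase k).size ≤ n := by
            have := pv_erase_size_lt d k hA
            omega
          rw [ih (d.erase k) hsz' hnd']
          show (gFold _ (d.items.filter fun q => !(q.1 == k))).2 = _
          rw [gfold_filter_skip skip_progs k hc]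
        · rw [if_neg hc]
          have hmem : k ∉ skip_progs := by
            simpa using eq_false_of_ne_true hc
          rcases hres with ⟨l1, l2, hl, _, hv, h1, h2⟩
          have hres' : IsRes (fun k' => !(skip_progs.contains k')) d.items k v :=
            ⟨l1, l2, hl, by simp [hmem], hv, fun kv h hp => h1 kv h rfl,
              fun kv h hp => h2 kv h rfl⟩
          rw [gfold_char _ d.items k v hres']

-- ===== VERDICT (by name: the statement is the Claim_ definition above) =====
theorem best_possible_spec : Claim_equal_best_possible := by
  intro progs skip_progs _
  unfold Spec_best_possible
  rw [alt_bridge]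
  exact loop_eq skip_progs (PySem.Dict.ofList progs).size (PySem.Dict.ofList progs) le_rfl
    (PySem.Dict.nodup_keys_ofList progs)
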